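-- pv_equiv track=rewrite | github.com/Invalid-coder/Data-Structures-and-algorithms | Linear_structures/Stack/Tasks/eolymp(1377).py | findNotations
-- ===== SOURCE A (Python) =====
-- def get_int_digit(digit):
--     if digit.isdigit():
--         return int(digit)
--     else:
--         return ord(digit) - ord('A') + 10
--
-- def decimal(num, base):
--     d = 0
--
--     for i, c in enumerate(num[::-1]):
--         digit = get_int_digit(c)
--
--         if digit >= base:
--             return None
--
--         d += digit * (base ** i)
--
--     return d
--
-- def findNotations(x, y):
--     for b1 in range(2, 37):
--         for b2 in range(2, 37):
--             if b1 != b2: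
--                 x1, y1 = decimal(x, b1), decimal(y, b2)
--
--                 if x1 and y1:
--                     if x1 == y1:
--                         return (b1, b2)
--
--     return None
-- ===== SOURCE B (Python) =====
-- def _value(num, base):
--     # Horner evaluation left-to-right; None if some digit >= base
--     d = 0
--     for c in num:
--         digit = int(c) if c.isdigit() else ord(c) - ord('A') + 10
--         if digit >= base:
--             return None
--         d = d * base + digit
--     return d
--
-- def findNotations(x, y):
--     index = {}
--     for b2 in range(2, 37):
--         v = _value(y, b2)
--         if v:
--             index.setdefault(v, []).append(b2)
--     for b1 in range(2, 37):
--         v = _value(x, b1)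
--         if v:
--             for b2 in index.get(v, []):
--                 if b2 != b1:
--                     return (b1, b2)
--     return None
-- ===== Notes on version B (the rewrite author's own statement) =====
-- stated objective: faster
-- what changed: B replaces A's 35x35 nested scan (recomputing decimal(y,b2) for every b1) by one pass that builds a dict from each nonzero decimal value of y to its sorted bases, plus one pass over b1 with a single lookup; the digit evaluation itself uses left-to-right Horner instead of reversed positional powers.
import Mathlib
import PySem

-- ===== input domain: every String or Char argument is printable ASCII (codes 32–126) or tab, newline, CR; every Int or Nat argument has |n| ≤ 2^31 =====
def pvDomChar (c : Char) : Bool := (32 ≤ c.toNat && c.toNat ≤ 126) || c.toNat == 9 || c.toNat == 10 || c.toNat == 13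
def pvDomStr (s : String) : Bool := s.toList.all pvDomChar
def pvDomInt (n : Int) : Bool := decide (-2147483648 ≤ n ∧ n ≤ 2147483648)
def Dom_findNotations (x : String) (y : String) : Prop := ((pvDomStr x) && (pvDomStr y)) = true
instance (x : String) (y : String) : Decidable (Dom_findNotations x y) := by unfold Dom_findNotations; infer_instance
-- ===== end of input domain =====

-- B builds a value→bases dict for y once and does one lookup pass over b1
-- instead of A's nested 35×35 scan; return values are proved identical for all inputs.

-- ===== PORT A =====

-- get_int_digit(digit)
def getIntDigit (c : Char) : Int :=
  if PySem.Chars.isdigit c then (PySem.Int.ofChars? [c]).getD 0  -- int(digit); never none when isdigit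
  else (c.toNat : Int) - ('A'.toNat : Int) + 10

-- the 'for i, c in enumerate(num[::-1])' loop of decimal, with the running index i
def decLoopA (base : Int) : List Char → Nat → Int → Option Int
  | [], _, d => some d
  | c :: rest, i, d =>
    let digit := getIntDigit c
    if digit ≥ base then none
    else decLoopA base rest (i + 1) (d + digit * base ^ i)

-- decimal(num, base); num[::-1] is the reversed character list (PySem.Str.slice?_none_none_neg_one)
def decimalA (num : String) (base : Int) : Option Int :=
  decLoopA base num.toList.reverse 0 0

def truthyA : Option Int → Bool
  | none => false
  | some v => v != 0

-- inner 'for b2 in range(2, 37)' loop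
def innerA (x y : String) (b1 : Int) : List Int → Option (List Int)
  | [] => none
  | b2 :: rest =>
    if b1 ≠ b2 then
      let x1 := decimalA x b1
      let y1 := decimalA y b2
      if truthyA x1 && truthyA y1 then
        if x1 = y1 then some [b1, b2] else innerA x y b1 rest
      else innerA x y b1 rest
    else innerA x y b1 rest

-- outer 'for b1 in range(2, 37)' loop
def outerA (x y : String) : List Int → Option (List Int)
  | [] => none
  | b1 :: rest =>
    match innerA x y b1 (PySem.List.pyRange 2 37 1) with
    | some r => some r
    | none => outerA x y rest

def findNotations (x : String) (y : String) : Option (List Int) :=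
  outerA x y (PySem.List.pyRange 2 37 1)

-- ===== PORT B =====

-- the loop body of _value: Horner step, left to right
def valLoopB (base : Int) : List Char → Int → Option Int
  | [], d => some d
  | c :: rest, d =>
    let digit := if PySem.Chars.isdigit c then (PySem.Int.ofChars? [c]).getD 0
                 else (c.toNat : Int) - ('A'.toNat : Int) + 10
    if digit ≥ base then none
    else valLoopB base rest (d * base + digit)

-- _value(num, base)
def valB (num : String) (base : Int) : Option Int :=
  valLoopB base num.toList 0

-- 'index.setdefault(v, []).append(b2)' over b2 in range(2, 37)
def buildIndexB (y : String) : PySem.Dict Int (List Int) :=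
  (PySem.List.pyRange 2 37 1).foldl
    (fun d b2 =>
      match valB y b2 with
      | some v => if v ≠ 0 then d.modify v [] (· ++ [b2]) else d
      | none => d)
    PySem.Dict.empty

-- 'for b2 in index.get(v, []): if b2 != b1: return (b1, b2)'
def scanB (b1 : Int) : List Int → Option (List Int)
  | [] => none
  | b2 :: rest => if b2 ≠ b1 then some [b1, b2] else scanB b1 rest

-- 'for b1 in range(2, 37)' lookup loop
def outerB (x : String) (idx : PySem.Dict Int (List Int)) : List Int → Option (List Int)
  | [] => none
  | b1 :: rest =>
    match valB x b1 with
    | some v =>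
      if v ≠ 0 then
        match scanB b1 (idx.getD v []) with
        | some r => some r
        | none => outerB x idx rest
      else outerB x idx rest
    | none => outerB x idx rest

def findNotations_alt (x : String) (y : String) : Option (List Int) :=
  let idx := buildIndexB y
  outerB x idx (PySem.List.pyRange 2 37 1)

-- ===== PRECONDITION & SPEC =====
def Spec_findNotations (x : String) (y : String) (out : Option (List Int)) : Prop := out = findNotations_alt x y
instance (x : String) (y : String) (out : Option (List Int)) : Decidable (Spec_findNotations x y out) := by unfold Spec_findNotations; infer_instance

-- ===== CLAIM (what is proved, stated in full; the proofs are below) =====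
def Claim_equal_findNotations : Prop := ∀ (x : String) (y : String), Dom_findNotations x y → Spec_findNotations x y (findNotations x y)

-- ===== LEMMAS AND PROOFS =====

def pvPoly (b : Int) : List Char → Nat → Int
  | [], _ => 0
  | c :: r, i => getIntDigit c * b ^ i + pvPoly b r (i + 1)

def pvHorner (b : Int) : List Char → Int → Int
  | [], d => d
  | c :: r, d => pvHorner b r (d * b + getIntDigit c)


lemma decLoopA_eq (b : Int) : ∀ (l : List Char) (i : Nat) (d : Int),
    decLoopA b l i d = if l.all (fun c => getIntDigit c < b) then some (d + pvPoly b l i) else none := by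
  intro l
  induction l with
  | nil => intro i d; simp [decLoopA, pvPoly]
  | cons c r ih =>
    intro i d
    by_cases h : getIntDigit c ≥ b
    · simp [decLoopA, h, show ¬ getIntDigit c < b by omega]
    · simp only [decLoopA, if_neg h, ih, pvPoly, List.all_cons,
        show getIntDigit c < b from by omega, decide_true, Bool.true_and]
      split_ifs <;> simp [add_assoc]


lemma valLoopB_cons (b : Int) (c : Char) (r : List Char) (d : Int) :
    valLoopB b (c :: r) d = if getIntDigit c ≥ b then none else valLoopB b r (d * b + getIntDigit c) := rfl

lemma valLoopB_eq (b : Int) : ∀ (l : List Char) (d : Int),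
    valLoopB b l d = if l.all (fun c => getIntDigit c < b) then some (pvHorner b l d) else none := by
  intro l
  induction l with
  | nil => intro d; simp [valLoopB, pvHorner]
  | cons c r ih =>
    intro d
    rw [valLoopB_cons]
    by_cases h : getIntDigit c ≥ b
    · simp [h, show ¬ getIntDigit c < b by omega]
    · simp [h, ih, pvHorner, show getIntDigit c < b from by omega]

lemma pvPoly_append (b : Int) (c : Char) : ∀ (l : List Char) (i : Nat),
    pvPoly b (l ++ [c]) i = pvPoly b l i + getIntDigit c * b ^ (i + l.length) := by
  intro l
  induction l with
  | nil => intro i; simp [pvPoly]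
  | cons a r ih =>
    intro i
    simp only [List.cons_append, pvPoly, ih, List.length_cons]
    ring_nf

lemma pvHorner_eq (b : Int) : ∀ (l : List Char) (d : Int),
    pvHorner b l d = d * b ^ l.length + pvPoly b l.reverse 0 := by
  intro l
  induction l with
  | nil => intro d; simp [pvHorner, pvPoly]
  | cons c r ih =>
    intro d
    simp only [pvHorner, ih, List.reverse_cons, List.length_cons, pvPoly_append, List.length_reverse]
    ring

lemma dec_eq (s : String) (b : Int) : decimalA s b = valB s b := by
  rw [decimalA, valB, decLoopA_eq, valLoopB_eq, List.all_reverse]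
  split_ifs with h
  · rw [pvHorner_eq]; simp
  · rfl
lemma find?_filter' (p q : Int → Bool) (l : List Int) :
    List.find? p (l.filter q) = List.find? (fun a => q a && p a) l := by
  induction l with
  | nil => rfl
  | cons a l ih =>
    by_cases hq : q a <;> simp [hq, List.find?_cons, ih]

lemma innerA_eq (x y : String) (b1 : Int) : ∀ (l : List Int),
    innerA x y b1 l =
      (l.find? (fun b2 => decide (b1 ≠ b2) && (truthyA (valB x b1) && truthyA (valB y b2))
                 && decide (valB x b1 = valB y b2))).map (fun b2 => [b1, b2]) := by
  intro l
  induction l with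
  | nil => rfl
  | cons b2 r ih =>
    rw [innerA, List.find?_cons]
    simp only [dec_eq]
    by_cases h12 : b1 ≠ b2
    · by_cases ht : (truthyA (valB x b1) && truthyA (valB y b2)) = true
      · by_cases he : valB x b1 = valB y b2
        · have hp : (decide (b1 ≠ b2) && (truthyA (valB x b1) && truthyA (valB y b2))
              && decide (valB x b1 = valB y b2)) = true := by rw [ht]; simp [h12, he]
          rw [if_pos h12, if_pos ht, if_pos he, hp]
          rfl
        · simp [h12, ht, he, ih]
      · simp only [Bool.not_eq_true] at ht
        simp [h12, ht, ih]
    · simp [h12, ih]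

lemma scanB_eq (b1 : Int) : ∀ (l : List Int),
    scanB b1 l = (l.find? (fun b2 => decide (b2 ≠ b1))).map (fun b2 => [b1, b2]) := by
  intro l
  induction l with
  | nil => rfl
  | cons b2 r ih =>
    rw [scanB, List.find?_cons]
    by_cases h : b2 ≠ b1 <;> simp [h, ih]

lemma buildIndex_getD (y : String) (v : Int) (hv : v ≠ 0) :
    (buildIndexB y).getD v [] =
      (PySem.List.pyRange 2 37 1).filter (fun b2 => valB y b2 == some v) := by
  rw [buildIndexB]
  have key : ∀ (l : List Int) (d : PySem.Dict Int (List Int)),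
      (l.foldl (fun d b2 =>
        match valB y b2 with
        | some w => if w ≠ 0 then d.modify w [] (· ++ [b2]) else d
        | none => d) d).getD v []
      = d.getD v [] ++ l.filter (fun b2 => valB y b2 == some v) := by
    intro l
    induction l with
    | nil => intro d; simp
    | cons b2 r ih =>
      intro d
      rw [List.foldl_cons]
      cases hw : valB y b2 with
      | none => simp only []; rw [ih]; simp [hw]
      | some w =>
        simp only []
        by_cases hw0 : w ≠ 0
        · rw [if_pos hw0, ih, PySem.Dict.getD_modify]
          by_cases hvw : v = w
          · subst hvw
            simp [hw]
          · simp [hvw, Ne.symm hvw, hw]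
        · simp only [ne_eq, Decidable.not_not] at hw0
          subst hw0
          rw [if_neg (by simp), ih]
          simp [hw, Ne.symm hv]
  rw [key]
  simp

lemma outer_eq (x y : String) : ∀ l : List Int,
    outerA x y l = outerB x (buildIndexB y) l := by
  intro l
  induction l with
  | nil => rfl
  | cons b1 r ih =>
    rw [outerA, outerB]
    cases hv1 : valB x b1 with
    | none =>
      have hA : innerA x y b1 (PySem.List.pyRange 2 37 1) = none := by
        rw [innerA_eq]
        simp [hv1, truthyA]
      rw [hA, ih]
    | some v =>
      by_cases hv0 : v ≠ 0
      · have hA : innerA x y b1 (PySem.List.pyRange 2 37 1)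
            = scanB b1 ((buildIndexB y).getD v []) := by
          rw [innerA_eq, buildIndex_getD y v hv0, scanB_eq, find?_filter']
          congr 1
          congr 1
          funext b2
          by_cases hq : valB y b2 = some v
          · simp [hq, hv1, truthyA, hv0, ne_comm]
          · have h1 : (valB y b2 == some v) = false := by simp [hq]
            have h2 : decide (valB x b1 = valB y b2) = false := by
              rw [hv1]
              simpa using fun h => hq (Eq.symm h)
            simp [h1, h2]
        rw [hA]
        dsimp only
        rw [if_pos hv0]
        cases scanB b1 ((buildIndexB y).getD v []) <;> simp [ih]
      · simp only [ne_eq, Decidable.not_not] at hv0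
        subst hv0
        have hA : innerA x y b1 (PySem.List.pyRange 2 37 1) = none := by
          rw [innerA_eq]
          simp [hv1, truthyA]
        rw [hA]
        dsimp only
        rw [if_neg (by simp), ih]


-- ===== VERDICT (by name: the statement is the Claim_ definition above) =====
theorem findNotations_spec : Claim_equal_findNotations := by
  intro x y _
  unfold Spec_findNotations
  rw [findNotations, findNotations_alt]
  exact outer_eq x y _
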